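-- pv_equiv track=rewrite | github.com/grzegorznowacki/tsp | utils.py | create_buckets
-- ===== SOURCE A (Python) =====
-- def divide_list(my_list, n):
--     return [my_list[i * n:(i + 1) * n] for i in range((len(my_list) + n - 1) // n)]
--
-- def create_buckets(divided_range_list):
--     buckets_list = []
--     for range_x in divided_range_list:
--         for range_y in divided_range_list:
--             buckets_list.append((range_x, range_y))
--     divided_list = divide_list(buckets_list, len(divided_range_list))
--     even_list = divided_list[0::2]
--     odd_list = divided_list[1::2]
--     for sublist in odd_list:
--         sublist.reverse()
--     result = [None] * (len(even_list) + len(odd_list))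
--     result[::2] = even_list
--     result[1::2] = odd_list
--     final_list = [j for i in result for j in i]
--     return final_list
-- ===== SOURCE B (Python) =====
-- def create_buckets(divided_range_list):
--     result = []
--     for i, range_x in enumerate(divided_range_list):
--         row = [(range_x, range_y) for range_y in divided_range_list]
--         if i % 2 == 1:
--             row.reverse()
--         result.extend(row)
--     return result
-- ===== Notes on version B (the rewrite author's own statement) =====
-- stated objective: simpler
-- what changed: B emits the boustrophedon order directly in one enumerate loop (build each row, reverse it when the row index is odd), dropping A's build-all-pairs / chunk / even-odd split / in-place reverse / slice-interleave pipeline.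
import Mathlib
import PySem

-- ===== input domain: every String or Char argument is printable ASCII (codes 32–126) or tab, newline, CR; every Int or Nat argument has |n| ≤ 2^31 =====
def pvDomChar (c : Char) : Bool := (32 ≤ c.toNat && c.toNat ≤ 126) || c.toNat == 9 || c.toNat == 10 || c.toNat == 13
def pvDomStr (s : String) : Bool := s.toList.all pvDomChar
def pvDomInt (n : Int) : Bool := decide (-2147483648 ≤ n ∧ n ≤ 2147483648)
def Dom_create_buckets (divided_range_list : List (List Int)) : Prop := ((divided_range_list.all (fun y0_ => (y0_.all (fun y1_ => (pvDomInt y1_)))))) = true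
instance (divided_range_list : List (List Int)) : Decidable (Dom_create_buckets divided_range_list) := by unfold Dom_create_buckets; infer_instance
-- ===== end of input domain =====

-- B replaces A's build-all-pairs / chunk / even-odd split / slice-interleave pipeline by one
-- enumerate loop that emits each row directly, reversed when the row index is odd (simpler).
-- On [] A raises ZeroDivisionError (excluded by Pre_); B returns [] there.


-- ===== PORT A =====
-- hand port of 'result[::2] = even_list; result[1::2] = odd_list' over a [None]*(len+len)
-- list followed by the flatten comprehension: exact interleaving, which is what the slice
-- assignments perform when len even_list - len odd_list is 0 or 1 (always the case here)
def interleaveA {α : Type} : List α → List α → List α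
  | [], ys => ys
  | x :: xs, ys => x :: interleaveA ys xs
termination_by xs ys => xs.length + ys.length
decreasing_by simp; omega

-- divide_list(my_list, n): [my_list[i*n:(i+1)*n] for i in range((len(my_list)+n-1)//n)]
def divide_list (my_list : List (List Int × List Int)) (n : Int) : List (List (List Int × List Int)) :=
  (PySem.List.pyRange 0 (PySem.Int.floordiv ((my_list.length : Int) + n - 1) n)).map
    (fun i => PySem.List.slice my_list (some (i * n)) (some ((i + 1) * n)))

def create_buckets (divided_range_list : List (List Int)) : List (List Int × List Int) :=
  let buckets_list :=
    divided_range_list.foldl (fun acc range_x =>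
      divided_range_list.foldl (fun acc2 range_y => acc2 ++ [(range_x, range_y)]) acc) []
  let divided_list := divide_list buckets_list (divided_range_list.length : Int)
  -- divided_list[0::2] / divided_list[1::2]; step 2 ≠ 0, so slice? is always 'some' (.getD [] never fires)
  let even_list := (PySem.List.slice? divided_list (some 0) none 2).getD []
  let odd_list := (PySem.List.slice? divided_list (some 1) none 2).getD []
  -- 'for sublist in odd_list: sublist.reverse()' (in-place reverse of each odd chunk)
  let odd_list := odd_list.map List.reverse
  (interleaveA even_list odd_list).flatMap id

-- ===== PORT B =====
def create_buckets_alt (divided_range_list : List (List Int)) : List (List Int × List Int) :=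
  (PySem.List.enumerate divided_range_list).foldl (fun result p =>
    let row := divided_range_list.map (fun range_y => (p.2, range_y))
    let row := if p.1 % 2 == 1 then row.reverse else row
    result ++ row) []

-- ===== PRECONDITION & SPEC =====
-- Pre_ excludes exactly the empty list, on which A raises ZeroDivisionError
-- (divide_list divides by len(divided_range_list) = 0).
def Pre_create_buckets (divided_range_list : List (List Int)) : Prop := divided_range_list ≠ []
instance (divided_range_list : List (List Int)) : Decidable (Pre_create_buckets divided_range_list) := by unfold Pre_create_buckets; infer_instance
def pvWitness_create_buckets : List (List Int) := [[1, 2], [3], [4, 5]]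

def Spec_create_buckets (divided_range_list : List (List Int)) (out : List (List Int × List Int)) : Prop := out = create_buckets_alt divided_range_list
instance (divided_range_list : List (List Int)) (out : List (List Int × List Int)) : Decidable (Spec_create_buckets divided_range_list out) := by unfold Spec_create_buckets; infer_instance

-- ===== CLAIM (what is proved, stated in full; the proofs are below) =====
def Claim_equal_create_buckets : Prop := ∀ (divided_range_list : List (List Int)), Dom_create_buckets divided_range_list → Pre_create_buckets divided_range_list → Spec_create_buckets divided_range_list (create_buckets divided_range_list)

-- ===== LEMMAS AND PROOFS =====
mutual
def evensL {α : Type} : List α → List α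
  | [] => []
  | x :: t => x :: oddsL t
def oddsL {α : Type} : List α → List α
  | [] => []
  | _ :: t => evensL t
end

theorem filterMap_even {α : Type} : ∀ (xs : List α),
    List.filterMap (fun k => xs[2 * k]?) (List.range ((xs.length + 1) / 2)) = evensL xs
  | [] => by simp [evensL]
  | [x] => by simp [evensL, oddsL]
  | x :: y :: t => by
    have ih := filterMap_even t
    have hlen : ((x :: y :: t).length + 1) / 2 = (t.length + 1) / 2 + 1 := by
      simp; omega
    rw [hlen, List.range_succ_eq_map, List.filterMap_cons, List.filterMap_map]
    simp only [evensL, oddsL]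
    simpa using ih

theorem slice?_step2_zero {α : Type} (xs : List α) :
    PySem.List.slice? xs (some 0) none 2 = some (evensL xs) := by
  simp only [PySem.List.slice?, PySem.List.sliceIndices]
  norm_num
  cases xs with
  | nil => simp [evensL]
  | cons x t =>
    rw [if_pos (by simp)]
    have hc : (((↑(x :: t).length : Int) + 2 - 1) / 2).toNat = ((x :: t).length + 1) / 2 := by omega
    have hf : (fun k : Nat => (x :: t)[(2 * (k : Int)).toNat]?) = (fun k => (x :: t)[2 * k]?) := by
      funext k; rw [show ((2:Int) * (k:Int)).toNat = 2 * k by omega]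
    rw [hc, hf]
    exact filterMap_even (x :: t)

theorem slice?_step2_one {α : Type} (xs : List α) :
    PySem.List.slice? xs (some 1) none 2 = some (oddsL xs) := by
  simp only [PySem.List.slice?, PySem.List.sliceIndices]
  norm_num
  cases xs with
  | nil => simp [oddsL]
  | cons x t =>
    have hc : (if 1 < (x :: t).length then (((↑(x :: t).length : Int) - min 1 ↑(x :: t).length + 2 - 1) / 2).toNat else 0) = (t.length + 1) / 2 := by
      simp only [List.length_cons]; split_ifs <;> omega
    have hf : (fun k : Nat => (x :: t)[(min 1 (↑(x :: t).length : Int) + 2 * ↑k).toNat]?) = (fun k => t[2 * k]?) := by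
      funext k
      have h1 : (min 1 (↑(x :: t).length : Int) + 2 * ↑k).toNat = 2 * k + 1 := by
        simp only [List.length_cons]; omega
      rw [h1]; simp
    rw [hc, hf]
    exact filterMap_even t

def snakeRows {α : Type} (i : Int) : List (List α) → List (List α)
  | [] => []
  | r :: rs => (if i % 2 == 1 then r.reverse else r) :: snakeRows (i + 1) rs

theorem interleave_snake {α : Type} : ∀ (R : List (List α)),
    (∀ i : Int, i % 2 = 0 → interleaveA (evensL R) ((oddsL R).map List.reverse) = snakeRows i R) ∧
    (∀ i : Int, i % 2 = 1 → interleaveA ((evensL R).map List.reverse) (oddsL R) = snakeRows i R)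
  | [] => by constructor <;> intro i hi <;> simp [evensL, oddsL, interleaveA, snakeRows]
  | r :: rs => by
    obtain ⟨ih0, ih1⟩ := interleave_snake rs
    constructor
    · intro i hi
      have h1 : (i + 1) % 2 = 1 := by omega
      simp only [evensL, oddsL, interleaveA, snakeRows]
      rw [if_neg (by simp [hi]), ih1 (i + 1) h1]
    · intro i hi
      have h0 : (i + 1) % 2 = 0 := by omega
      simp only [evensL, oddsL, List.map_cons, interleaveA, snakeRows]
      rw [if_pos (by simp [hi]), ih0 (i + 1) h0]

theorem chunk_flatten {α : Type} (n : Nat) : ∀ (R : List (List α)), (∀ r ∈ R, r.length = n) →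
    (List.range R.length).map (fun k => (R.flatten.drop (k * n)).take n) = R
  | [], _ => by simp
  | r :: rs, h => by
    have hr : r.length = n := h r (by simp)
    have ih := chunk_flatten n rs (fun x hx => h x (by simp [hx]))
    rw [List.length_cons, List.range_succ_eq_map, List.map_cons, List.map_map]
    congr 1
    · simp only [Nat.zero_mul, List.drop_zero, List.flatten_cons, List.take_left' hr]
    · refine Eq.trans (List.map_congr_left ?_) ih
      intro k _
      simp only [Function.comp_apply, List.flatten_cons]
      have h2 : Nat.succ k * n = n + k * n := by rw [Nat.succ_mul, Nat.add_comm]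
      rw [h2, ← List.drop_drop, List.drop_left' hr]

theorem enumerate_flatMap_snake {α β : Type} (f : α → List β) :
    ∀ (l : List α) (i : Int),
    (PySem.List.enumerate l i).flatMap
        (fun p => if p.1 % 2 == 1 then (f p.2).reverse else f p.2)
      = (snakeRows i (l.map f)).flatten
  | [], i => by simp [PySem.List.enumerate, snakeRows]
  | x :: t, i => by
    rw [show PySem.List.enumerate (x :: t) i = (i, x) :: PySem.List.enumerate t (i + 1) from rfl]
    simp only [List.flatMap_cons, List.map_cons, snakeRows, List.flatten_cons]
    rw [enumerate_flatMap_snake f t (i + 1)]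

theorem main_eq (l : List (List Int)) (h : l ≠ []) : create_buckets l = create_buckets_alt l := by
  have hn : 0 < l.length := List.length_pos_iff.mpr h
  have hf : ∀ (x : List Int) (acc : List (List Int × List Int)), l.foldl (fun a y => a ++ [(x, y)]) acc = acc ++ l.map (fun y => (x, y)) := by
    intro x acc
    rw [PySem.List.foldl_append_eq_flatMap (fun y => [(x, y)]) l acc]
    congr 1
    clear h hn
    induction l with
    | nil => rfl
    | cons a t ih => simp only [List.flatMap_cons, List.map_cons, List.singleton_append, ih]
  have hbuck : l.foldl (fun acc range_x =>
      l.foldl (fun acc2 range_y => acc2 ++ [(range_x, range_y)]) acc) []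
      = (l.map (fun x => l.map (fun y => (x, y)))).flatten := by
    have h1 : (fun (acc : List (List Int × List Int)) x =>
        l.foldl (fun a y => a ++ [(x, y)]) acc) = (fun acc x => acc ++ l.map (fun y => (x, y))) := by
      funext acc x; exact hf x acc
    rw [h1, PySem.List.foldl_append_eq_flatMap (fun x => l.map (fun y => (x, y))) l []]
    simp [List.flatMap_def]
  have hrowlen : ∀ r ∈ l.map (fun x => l.map (fun y => (x, y))), r.length = l.length := by
    intro r hr
    simp only [List.mem_map] at hr
    obtain ⟨x, _, rfl⟩ := hr
    simp
  have hblen : ((l.map (fun x => l.map (fun y => (x, y)))).flatten).length = l.length * l.length := by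
    simp only [List.length_flatten, List.map_map, Function.comp_def, List.length_map]
    rw [List.map_const', List.sum_replicate, smul_eq_mul]
  have hdivcount : PySem.Int.floordiv ((l.length * l.length : Nat) + (l.length : Int) - 1) (l.length : Int) = (l.length : Int) := by
    rw [PySem.Int.floordiv_eq_ediv_of_pos (by exact_mod_cast hn)]
    have : ((l.length * l.length : Nat) : Int) + (l.length : Int) - 1
        = ((l.length : Int) - 1) + (l.length : Int) * (l.length : Int) := by push_cast; ring
    rw [this, Int.add_mul_ediv_left _ _ (by exact_mod_cast hn.ne')]
    rw [Int.ediv_eq_zero_of_lt (by omega) (by omega)]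
    ring
  have hdiv : divide_list ((l.map (fun x => l.map (fun y => (x, y)))).flatten) (l.length : Int)
      = l.map (fun x => l.map (fun y => (x, y))) := by
    unfold divide_list
    rw [hblen]
    rw [show ((l.length * l.length : Nat) : Int) = ((l.length * l.length : Nat) : Int) from rfl]
    rw [hdivcount, PySem.List.pyRange_zero_nat, List.map_map]
    have h2 : ∀ k : Nat, PySem.List.slice ((l.map (fun x => l.map (fun y => (x, y)))).flatten)
        (some ((k : Int) * (l.length : Int))) (some (((k : Int) + 1) * (l.length : Int)))
        = (((l.map (fun x => l.map (fun y => (x, y)))).flatten.drop (k * l.length)).take l.length) := by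
      intro k
      have e1 : ((k : Int) * (l.length : Int)) = ((k * l.length : Nat) : Int) := by push_cast; ring
      have e2 : (((k : Int) + 1) * (l.length : Int)) = ((k * l.length : Nat) : Int) + (l.length : Int) := by push_cast; ring
      rw [e1, e2, PySem.List.slice_natCast_add]
    have h3 : ((fun i => PySem.List.slice ((l.map (fun x => l.map (fun y => (x, y)))).flatten) (some (i * (l.length:Int))) (some ((i + 1) * (l.length:Int)))) ∘ (fun k : Nat => (k : Int)))
        = fun k : Nat => (((l.map (fun x => l.map (fun y => (x, y)))).flatten.drop (k * l.length)).take l.length) := by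
      funext k; exact h2 k
    rw [h3]
    have := chunk_flatten l.length (l.map (fun x => l.map (fun y => (x, y)))) hrowlen
    simpa using this
  -- assemble
  simp only [create_buckets, create_buckets_alt]
  rw [hbuck, hdiv]
  rw [slice?_step2_zero, slice?_step2_one]
  simp only [Option.getD_some]
  rw [List.flatMap_id]
  rw [(interleave_snake (l.map (fun x => l.map (fun y => (x, y))))).1 0 (by decide)]
  rw [← enumerate_flatMap_snake (fun x => l.map (fun y => (x, y))) l 0]
  rw [PySem.List.foldl_append_eq_flatMap]
  simp

-- ===== VERDICT (by name: the statement is the Claim_ definition above) =====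
theorem create_buckets_spec : Claim_equal_create_buckets := by
  intro l _ hpre
  exact main_eq l hpre
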